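-- pv_equiv track=rewrite | github.com/miliar/Code_Jam_Webscraper | Solutions_python/Problem_201/2214.py | solve
-- ===== SOURCE A (Python) =====
-- from math import floor, ceil
-- from heapq import heappop, heappush
--
-- def solve(n, k):
-- 	maxheap = [-n]
-- 	for _ in range(k-1):
-- 		freespace = heappop(maxheap) + 1
-- 		heappush(maxheap, floor(freespace/2))
-- 		heappush(maxheap, ceil(freespace/2))
-- 	sol = heappop(maxheap) + 1
-- 	return -floor(sol/2), -ceil(sol/2)
-- ===== SOURCE B (Python) =====
-- def _insert(segs, length, count):
--     # insert into a list of (length, count) pairs kept sorted by decreasing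
--     # length, merging with an existing entry of the same length
--     for i, (L, c) in enumerate(segs):
--         if L == length:
--             segs[i] = (L, c + count)
--             return
--         if L < length:
--             segs.insert(i, (length, count))
--             return
--     segs.append((length, count))
--
--
-- def solve(n, k):
--     # Batch simulation: segments grouped as (length, count) pairs sorted by
--     # decreasing length; all segments of the current maximal length are split
--     # in one step instead of one at a time.
--     segs = [(n, 1)]
--     remaining = k - 1
--     while True:
--         L, c = segs.pop(0)
--         if remaining < c:
--             return (L // 2, (L - 1) // 2)
--         remaining -= c
--         _insert(segs, L // 2, c)
--         _insert(segs, (L - 1) // 2, c)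
-- ===== Notes on version B (the rewrite author's own statement) =====
-- stated objective: faster
-- what changed: Replaces the max-heap simulation that splits one segment per heap pop (k-1 pops) by a batch simulation over sorted (length, count) pairs that splits all currently-maximal segments in one step; Pre_ excludes negative n (a negative segment length is outside the problem's natural domain, and there A's order of heap pops makes the result an artefact of single-step splitting).
-- outside the precondition, e.g. on solve(-3, 3): A returns (-1, -1), B returns (-1, -2)
import Mathlib
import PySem

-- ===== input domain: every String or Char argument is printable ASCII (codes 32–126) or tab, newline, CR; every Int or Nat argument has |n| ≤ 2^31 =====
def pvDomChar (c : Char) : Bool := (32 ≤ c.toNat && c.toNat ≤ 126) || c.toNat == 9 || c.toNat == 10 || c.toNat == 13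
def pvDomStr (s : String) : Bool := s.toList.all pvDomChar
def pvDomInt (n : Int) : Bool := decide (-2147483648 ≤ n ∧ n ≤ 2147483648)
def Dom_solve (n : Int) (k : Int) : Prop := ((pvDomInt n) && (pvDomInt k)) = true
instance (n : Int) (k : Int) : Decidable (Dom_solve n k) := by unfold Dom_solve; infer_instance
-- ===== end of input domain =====

-- B replaces A's one-heap-pop-per-split simulation (k-1 pops) by a batch simulation on
-- (length, count) pairs that splits all currently-maximal segments at once; equivalence
-- of the return values is proved for n ≥ 0 (Pre_solve).

-- ===== PORT A =====
-- heapq is ported by its contract: heappop removes and returns the minimum element of the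
-- heap list, heappush adds an element; the heap list is internal state of A only, so its
-- internal layout never reaches the result (the proof works up to permutation anyway).
def heappopA (h : List Int) : Int × List Int :=
  match PySem.List.min? h (fun x => x) with
  | some m => (m, (PySem.List.remove? h m).getD h)
  | none => (0, h)   -- empty heap: Python raises IndexError; A's heap is never empty

def solveLoopA (h : List Int) : Nat → List Int
  | 0 => h
  | i + 1 =>
    let p := heappopA h
    let freespace := p.1 + 1
    -- floor(freespace/2) and ceil(freespace/2); float division is exact on this domain
    solveLoopA ((p.2 ++ [PySem.Int.floordiv freespace 2]) ++ [-(PySem.Int.floordiv (-freespace) 2)]) i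

def solve (n : Int) (k : Int) : Int × Int :=
  let h := solveLoopA [-n] (k - 1).toNat
  let p := heappopA h
  let sol := p.1 + 1
  (-(PySem.Int.floordiv sol 2), PySem.Int.floordiv (-sol) 2)

-- ===== PORT B =====
-- _insert: insert (length, count) into a decreasing-by-length pair list, merging equal lengths
def insertSeg (segs : List (Int × Int)) (length : Int) (count : Int) : List (Int × Int) :=
  match segs with
  | [] => [(length, count)]
  | (L, c) :: rest =>
    if L = length then (L, c + count) :: rest
    else if L < length then (length, count) :: (L, c) :: rest
    else (L, c) :: insertSeg rest length count

def solveLoopB (segs : List (Int × Int)) (remaining : Int) : Int × Int :=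
  match segs with
  | [] => (0, 0)   -- unreachable: segs is never empty
  | (L, c) :: rest =>
    if _h1 : remaining < c then (PySem.Int.floordiv L 2, PySem.Int.floordiv (L - 1) 2)
    else if _h2 : c ≤ 0 then (0, 0)   -- totality guard only: counts are always ≥ 1
    else solveLoopB
      (insertSeg (insertSeg rest (PySem.Int.floordiv L 2) c) (PySem.Int.floordiv (L - 1) 2) c)
      (remaining - c)
termination_by remaining.toNat
decreasing_by omega

def solve_alt (n : Int) (k : Int) : Int × Int := solveLoopB [(n, 1)] (k - 1)

-- ===== PRECONDITION & SPEC =====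
-- Pre_ excludes negative n (a negative segment length), outside the problem's natural
-- domain; there A's value is an artefact of the order of its single-element heap pops.
def Pre_solve (n : Int) (k : Int) : Prop := 0 ≤ n
instance (n : Int) (k : Int) : Decidable (Pre_solve n k) := by unfold Pre_solve; infer_instance
def pvWitness_solve : Int × Int := (8, 3)

def Spec_solve (n : Int) (k : Int) (out : Int × Int) : Prop := out = solve_alt n k
instance (n : Int) (k : Int) (out : Int × Int) : Decidable (Spec_solve n k out) := by unfold Spec_solve; infer_instance

-- ===== CLAIM (what is proved, stated in full; the proofs are below) =====
def Claim_equal_solve : Prop := ∀ (n : Int) (k : Int), Dom_solve n k → Pre_solve n k → Spec_solve n k (solve n k)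

-- ===== LEMMAS AND PROOFS =====

-- Canonical model: the multiset of segment lengths kept as a descending sorted list;
-- one canonical step removes the head (a maximal length) and inserts its two halves.
def hiF (L : Int) : Int := -(PySem.Int.floordiv (1 - L) 2)   -- ceil((L-1)/2)
def loF (L : Int) : Int := PySem.Int.floordiv (L - 1) 2      -- floor((L-1)/2)
def ansOf (L : Int) : Int × Int := (hiF L, loF L)

def insD (a : Int) (l : List Int) : List Int := List.orderedInsert (· ≥ ·) a l

def cstep (s : List Int) : List Int :=
  match s with
  | [] => []
  | L :: t => insD (hiF L) (insD (loF L) t)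

-- pair-list representation as a multiset of lengths
def rep (segs : List (Int × Int)) : List Int :=
  segs.flatMap (fun p => List.replicate p.2.toNat p.1)

def Good (segs : List (Int × Int)) : Prop :=
  (segs.map Prod.fst).Pairwise (· > ·) ∧ ∀ p ∈ segs, 1 ≤ p.2

lemma loF_le_hiF (L : Int) : loF L ≤ hiF L := by
  simp only [loF, hiF, PySem.Int.floordiv_eq_ediv_of_pos (by norm_num : (0:Int) < 2)]
  omega

lemma hiF_eq_fdiv (L : Int) : hiF L = PySem.Int.floordiv L 2 := by
  simp only [hiF, PySem.Int.floordiv_eq_ediv_of_pos (by norm_num : (0:Int) < 2)]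
  omega

lemma hiF_nonneg {L : Int} (h : 0 ≤ L) : 0 ≤ hiF L := by
  rw [hiF_eq_fdiv, PySem.Int.floordiv_eq_ediv_of_pos (by norm_num : (0:Int) < 2)]
  omega

lemma hiF_le_self {L : Int} (h : 0 ≤ L) : hiF L ≤ L := by
  rw [hiF_eq_fdiv, PySem.Int.floordiv_eq_ediv_of_pos (by norm_num : (0:Int) < 2)]
  omega

lemma fdiv_neg_add (L : Int) : PySem.Int.floordiv (-L + 1) 2 = -(hiF L) := by
  rw [show -L + 1 = 1 - L from by ring]; simp [hiF]

lemma fdiv_neg_add' (L : Int) : PySem.Int.floordiv (-(-L + 1)) 2 = loF L := by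
  rw [show -(-L + 1) = L - 1 from by ring]; rfl

lemma cstep_sorted {s : List Int} (h : s.Pairwise (· ≥ ·)) : (cstep s).Pairwise (· ≥ ·) := by
  cases s with
  | nil => exact h
  | cons L t =>
    have ht : t.Pairwise (· ≥ ·) := (List.pairwise_cons.mp h).2
    exact List.Pairwise.orderedInsert _ _ (List.Pairwise.orderedInsert _ _ ht)

lemma cstep_ne_nil {s : List Int} (h : s ≠ []) : cstep s ≠ [] := by
  cases s with
  | nil => exact absurd rfl h
  | cons L t =>
    intro heq
    have hp := (List.perm_orderedInsert (· ≥ ·) (hiF L) (insD (loF L) t)).length_eq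
    have : cstep (L :: t) = List.orderedInsert (· ≥ ·) (hiF L) (insD (loF L) t) := rfl
    rw [this] at heq
    rw [heq] at hp
    simp at hp

lemma cstep_perm {s : List Int} {L : Int} {t : List Int} (h : s = L :: t) :
    (cstep s).Perm (t ++ [hiF L, loF L]) := by
  subst h
  have h1 : (cstep (L :: t)).Perm (hiF L :: insD (loF L) t) :=
    List.perm_orderedInsert _ _ _
  have h2 : (hiF L :: insD (loF L) t).Perm (hiF L :: loF L :: t) :=
    List.Perm.cons _ (List.perm_orderedInsert _ _ _)
  refine (h1.trans h2).trans ?_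
  have : hiF L :: loF L :: t = [hiF L, loF L] ++ t := rfl
  rw [this]
  exact List.perm_append_comm

lemma iterate_cstep_sorted {s : List Int} (h : s.Pairwise (· ≥ ·)) (i : Nat) :
    (cstep^[i] s).Pairwise (· ≥ ·) := by
  induction i generalizing s with
  | zero => exact h
  | succ i ih => rw [Function.iterate_succ_apply]; exact ih (cstep_sorted h)

lemma iterate_cstep_ne_nil {s : List Int} (h : s ≠ []) (i : Nat) : cstep^[i] s ≠ [] := by
  induction i generalizing s with
  | zero => exact h
  | succ i ih => rw [Function.iterate_succ_apply]; exact ih (cstep_ne_nil h)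

-- every member of a descending sorted list is at most its head
lemma le_headI_of_sorted {s : List Int} (hs : s.Pairwise (· ≥ ·)) {x : Int} (hx : x ∈ s) :
    x ≤ s.headI := by
  cases s with
  | nil => cases hx
  | cons a t =>
    rcases List.mem_cons.mp hx with h | h
    · simp [h]
    · exact (List.pairwise_cons.mp hs).1 x h

-- head of a descending sorted list is the maximum
lemma headI_eq_max {s : List Int} {L : Int} (hs : s.Pairwise (· ≥ ·))
    (hmem : L ∈ s) (hmax : ∀ x ∈ s, x ≤ L) : s.headI = L := by
  cases s with
  | nil => cases hmem
  | cons a t =>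
    have h1 : a ≤ L := hmax a List.mem_cons_self
    have h2 : L ≤ a := le_headI_of_sorted hs hmem
    simpa using le_antisymm h1 h2

-- PySem min?'s value is the minimum
lemma min?_eq_of_min {h : List Int} {m : Int} (hmem : m ∈ h) (hmin : ∀ y ∈ h, m ≤ y) :
    PySem.List.min? h (fun x => x) = some m := by
  have hne : h ≠ [] := by intro h0; subst h0; cases hmem
  rcases hm' : PySem.List.min? h (fun x => x) with _ | m'
  · exact absurd ((PySem.List.min?_eq_none_iff h (fun x => x)).mp hm') hne
  · have h1 : m' ∈ h := PySem.List.min?_mem hm'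
    have h2 : ∀ y ∈ h, m' ≤ y := fun y hy => PySem.List.min?_isMin hm' y hy
    have : m' = m := le_antisymm (h2 m hmem) (hmin m' h1)
    rw [this]

-- A-side bridge: the heap, seen as a multiset of lengths, follows the canonical process
lemma aLoop_perm : ∀ (i : Nat) (h s : List Int), h ≠ [] → (h.map (fun x => -x)).Perm s →
    s.Pairwise (· ≥ ·) → ((solveLoopA h i).map (fun x => -x)).Perm (cstep^[i] s) := by
  intro i
  induction i with
  | zero => intro h s _ hp _; simpa using hp
  | succ i ih =>
    intro h s hne hp hs
    have hsne : s ≠ [] := by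
      intro h0; subst h0
      exact hne (by simpa using hp.eq_nil)
    obtain ⟨L, t, rfl⟩ := List.exists_cons_of_ne_nil hsne
    have hmem : -L ∈ h := by
      have : L ∈ h.map (fun x => -x) := hp.symm.mem_iff.mp List.mem_cons_self
      obtain ⟨x, hx, hxe⟩ := List.mem_map.mp this
      have : x = -L := by omega
      rwa [this] at hx
    have hmin : ∀ y ∈ h, -L ≤ y := by
      intro y hy
      have : -y ∈ L :: t := hp.mem_iff.mp (List.mem_map.mpr ⟨y, hy, rfl⟩)
      rcases List.mem_cons.mp this with h1 | h1
      · omega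
      · have := (List.pairwise_cons.mp hs).1 _ h1
        omega
    have hmineq : PySem.List.min? h (fun x => x) = some (-L) := min?_eq_of_min hmem hmin
    have hrem : PySem.List.remove? h (-L) = some (h.erase (-L)) :=
      PySem.List.remove?_eq_some_erase h (-L) hmem
    have hstep : solveLoopA h (i + 1) =
        solveLoopA ((h.erase (-L) ++ [-(hiF L)]) ++ [-(loF L)]) i := by
      rw [solveLoopA]
      simp only [heappopA, hmineq, hrem, Option.getD_some]
      rw [fdiv_neg_add, fdiv_neg_add']
    rw [hstep]
    have hmap : (((h.erase (-L) ++ [-(hiF L)]) ++ [-(loF L)]).map (fun x => -x)).Perm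
        (cstep (L :: t)) := by
      have e1 : ((h.erase (-L) ++ [-(hiF L)]) ++ [-(loF L)]).map (fun x => -x)
          = (h.erase (-L)).map (fun x => -x) ++ [hiF L, loF L] := by
        simp
      have e2 : (h.erase (-L)).map (fun x => -x) = (h.map (fun x => -x)).erase L := by
        have hinj : Function.Injective (fun x : Int => -x) := fun u v huv => by dsimp at huv; omega
        rw [List.map_erase hinj]
        norm_num
      have e3 : ((h.map (fun x => -x)).erase L).Perm t := by
        have := hp.erase L
        simpa using this
      rw [e1, e2]
      exact ((e3.append_right _).trans (cstep_perm rfl).symm)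
    have hstep_ne : (h.erase (-L) ++ [-(hiF L)]) ++ [-(loF L)] ≠ [] := by simp
    have := ih _ _ hstep_ne hmap (cstep_sorted hs)
    rwa [← Function.iterate_succ_apply] at this

-- batch lemma: j ≤ m splits of a list whose maximal element L occurs ≥ m times
lemma cstep_batch {L : Int} (hle : hiF L ≤ L) :
    ∀ (j m : Nat) (s u : List Int), j ≤ m → s.Pairwise (· ≥ ·) →
    s.Perm (List.replicate m L ++ u) → (∀ x ∈ u, x ≤ L) →
    (cstep^[j] s).Perm (List.replicate (m - j) L ++ u ++
      List.replicate j (hiF L) ++ List.replicate j (loF L)) := by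
  intro j
  induction j with
  | zero => intro m s u _ _ hp _; simpa using hp
  | succ j ih =>
    intro m s u hjm hs hp hu
    have hm : 1 ≤ m := by omega
    have hrep : List.replicate m L ++ u = L :: (List.replicate (m - 1) L ++ u) := by
      rw [show m = (m - 1) + 1 from by omega, List.replicate_succ]
      simp
    have hmemL : L ∈ s := hp.symm.mem_iff.mp (by rw [hrep]; exact List.mem_cons_self)
    have hmax : ∀ x ∈ s, x ≤ L := by
      intro x hx
      have := hp.mem_iff.mp hx
      rcases List.mem_append.mp this with h1 | h1
      · rw [List.eq_of_mem_replicate h1]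
      · exact hu x h1
    have hsne : s ≠ [] := by intro h0; subst h0; cases hmemL
    obtain ⟨a, t, rfl⟩ := List.exists_cons_of_ne_nil hsne
    have ha : a = L := by
      have := headI_eq_max hs hmemL hmax; simpa using this
    subst ha
    have ht : t.Perm (List.replicate (m - 1) a ++ u) := by
      have := hp
      rw [hrep] at this
      exact this.cons_inv
    have hcs : (cstep (a :: t)).Perm (List.replicate (m - 1) a ++ (u ++ [hiF a, loF a])) := by
      refine (cstep_perm rfl).trans ((ht.append_right _).trans ?_)
      exact List.Perm.of_eq (List.append_assoc _ _ _)
    have hu' : ∀ x ∈ u ++ [hiF a, loF a], x ≤ a := by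
      intro x hx
      rcases List.mem_append.mp hx with h1 | h1
      · exact hu x h1
      · have := loF_le_hiF a
        simp only [List.mem_cons, List.not_mem_nil, or_false] at h1
        rcases h1 with rfl | rfl <;> omega
    have hres := ih (m - 1) (cstep (a :: t)) (u ++ [hiF a, loF a]) (by omega)
      (cstep_sorted hs) hcs hu'
    rw [Function.iterate_succ_apply]
    refine hres.trans ?_
    rw [List.perm_iff_count]
    intro x
    simp only [List.count_append, List.count_replicate, List.count_cons, List.count_nil]
    have : m - 1 - j = m - (j + 1) := by omega
    rw [this]
    split_ifs <;> omega

lemma mem_rep {segs : List (Int × Int)} {x : Int} (hx : x ∈ rep segs) :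
    ∃ p ∈ segs, x = p.1 := by
  obtain ⟨p, hp, hxp⟩ := List.mem_flatMap.mp hx
  exact ⟨p, hp, List.eq_of_mem_replicate hxp⟩

lemma rep_cons {L c : Int} (segs : List (Int × Int)) :
    rep ((L, c) :: segs) = List.replicate c.toNat L ++ rep segs := by simp [rep]

lemma rep_insertSeg : ∀ (segs : List (Int × Int)) (x c : Int), 1 ≤ c →
    (∀ p ∈ segs, 1 ≤ p.2) →
    (rep (insertSeg segs x c)).Perm (List.replicate c.toNat x ++ rep segs) := by
  intro segs
  induction segs with
  | nil => intro x c _ _; simp [insertSeg, rep]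
  | cons q rest ih =>
    intro x c hc hcnt
    obtain ⟨L, c'⟩ := q
    have hc' : 1 ≤ c' := hcnt (L, c') List.mem_cons_self
    rw [insertSeg]
    split_ifs with h1 h2
    · subst h1
      rw [List.perm_iff_count]
      intro y
      simp only [rep, List.flatMap_cons, List.count_append, List.count_replicate]
      split_ifs <;> omega
    · exact List.Perm.refl _
    · have hrec := ih x c hc (fun p hp => hcnt p (List.mem_cons_of_mem _ hp))
      rw [rep_cons, rep_cons]
      refine (hrec.append_left _).trans ?_
      rw [List.perm_iff_count]
      intro y
      simp only [List.count_append, List.count_replicate]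
      split_ifs <;> omega

lemma insertSeg_keys : ∀ (segs : List (Int × Int)) (x c : Int) (K : Int),
    K ∈ (insertSeg segs x c).map Prod.fst → K = x ∨ K ∈ segs.map Prod.fst := by
  intro segs
  induction segs with
  | nil => intro x c K hK; simp [insertSeg] at hK; simp [hK]
  | cons q rest ih =>
    intro x c K hK
    obtain ⟨L, c'⟩ := q
    rw [insertSeg] at hK
    split_ifs at hK with h1 h2
    · subst h1
      simp only [List.map_cons, List.mem_cons] at hK ⊢
      tauto
    · simp only [List.map_cons, List.mem_cons] at hK ⊢
      tauto
    · simp only [List.map_cons, List.mem_cons] at hK ⊢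
      rcases hK with h | h
      · tauto
      · rcases ih x c K h with h' | h' <;> tauto

lemma good_insertSeg : ∀ (segs : List (Int × Int)), Good segs → ∀ (x c : Int), 1 ≤ c →
    Good (insertSeg segs x c) := by
  intro segs
  induction segs with
  | nil => intro _ x c hc; exact ⟨by simp [insertSeg], by simp [insertSeg]; omega⟩
  | cons q rest ih =>
    intro hg x c hc
    obtain ⟨L, c'⟩ := q
    obtain ⟨hk, hcnt⟩ := hg
    have hk' : (rest.map Prod.fst).Pairwise (· > ·) :=
      (List.pairwise_cons.mp (by simpa using hk)).2
    have hLgt : ∀ K ∈ rest.map Prod.fst, L > K := (List.pairwise_cons.mp (by simpa using hk)).1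
    have hgrest : Good rest := ⟨hk', fun p hp => hcnt p (List.mem_cons_of_mem _ hp)⟩
    have hc' : 1 ≤ c' := hcnt (L, c') List.mem_cons_self
    rw [insertSeg]
    split_ifs with h1 h2
    · subst h1
      refine ⟨by simpa using hk, ?_⟩
      intro p hp
      rcases List.mem_cons.mp hp with h | h
      · subst h; simp; omega
      · exact hcnt p (List.mem_cons_of_mem _ h)
    · refine ⟨?_, ?_⟩
      · simp only [List.map_cons]
        refine List.pairwise_cons.mpr ⟨?_, by simpa using hk⟩
        intro K hK
        simp only [List.mem_cons] at hK
        rcases hK with rfl | hK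
        · omega
        · have := hLgt K hK
          omega
      · intro p hp
        rcases List.mem_cons.mp hp with h | h
        · subst h; simpa using hc
        · exact hcnt p h
    · have hgood' := ih hgrest x c hc
      refine ⟨?_, ?_⟩
      · simp only [List.map_cons]
        refine List.pairwise_cons.mpr ⟨?_, hgood'.1⟩
        intro K hK
        rcases insertSeg_keys rest x c K hK with h | h
        · omega
        · exact hLgt K h
      · intro p hp
        rcases List.mem_cons.mp hp with h | h
        · subst h; exact hc'
        · exact hgood'.2 p h

lemma insertSeg_ne_nil (segs : List (Int × Int)) (x c : Int) : insertSeg segs x c ≠ [] := by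
  cases segs with
  | nil => simp [insertSeg]
  | cons q rest =>
    obtain ⟨L, c'⟩ := q
    rw [insertSeg]
    split_ifs <;> simp

-- head key of an insertion is at least the inserted length and at least the old head key
lemma headKey_insertSeg_ge_arg (segs : List (Int × Int)) (x c : Int) :
    x ≤ (insertSeg segs x c).headI.1 := by
  cases segs with
  | nil => simp [insertSeg]
  | cons q rest =>
    obtain ⟨L, c'⟩ := q
    rw [insertSeg]
    split_ifs <;> simp <;> omega

lemma headKey_insertSeg_ge_head (segs : List (Int × Int)) (x c : Int) (h : segs ≠ []) :
    segs.headI.1 ≤ (insertSeg segs x c).headI.1 := by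
  cases segs with
  | nil => exact absurd rfl h
  | cons q rest =>
    obtain ⟨L, c'⟩ := q
    rw [insertSeg]
    split_ifs <;> simp <;> omega

lemma rep_sorted : ∀ {segs : List (Int × Int)}, Good segs → (rep segs).Pairwise (· ≥ ·) := by
  intro segs
  induction segs with
  | nil => intro _; simp [rep]
  | cons q rest ih =>
    intro hg
    obtain ⟨L, c'⟩ := q
    obtain ⟨hk, hcnt⟩ := hg
    have hLgt : ∀ K ∈ rest.map Prod.fst, L > K := (List.pairwise_cons.mp (by simpa using hk)).1
    have hrest := ih ⟨(List.pairwise_cons.mp (by simpa using hk)).2,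
      fun p hp => hcnt p (List.mem_cons_of_mem _ hp)⟩
    rw [rep_cons]
    refine List.pairwise_append.mpr ⟨List.pairwise_replicate.mpr (by simp), hrest, ?_⟩
    intro a ha b hb
    obtain ⟨p, hp, rfl⟩ := mem_rep hb
    have h1 := hLgt p.1 (List.mem_map.mpr ⟨p, hp, rfl⟩)
    have h2 := List.eq_of_mem_replicate ha
    omega

lemma rep_lt {segs : List (Int × Int)} {L c : Int} (hg : Good ((L, c) :: segs)) :
    ∀ x ∈ rep segs, x < L := by
  intro x hx
  obtain ⟨p, hp, rfl⟩ := mem_rep hx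
  have hk : (L :: segs.map Prod.fst).Pairwise (· > ·) := by simpa using hg.1
  have := (List.pairwise_cons.mp hk).1 p.1 (List.mem_map.mpr ⟨p, hp, rfl⟩)
  omega

-- B-side bridge: solveLoopB computes the answer of the canonical process
lemma bLoop_eq : ∀ (segs : List (Int × Int)) (r : Int), Good segs → segs ≠ [] →
    0 ≤ segs.headI.1 → solveLoopB segs r = ansOf (cstep^[r.toNat] (rep segs)).headI := by
  intro segs r
  induction segs, r using solveLoopB.induct with
  | case1 r => intro _ hne; exact absurd rfl hne
  | case2 r L c rest h1 =>
    intro hg _ hhd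
    have hc : 1 ≤ c := hg.2 (L, c) List.mem_cons_self
    have hL : 0 ≤ L := by simpa using hhd
    rw [solveLoopB, dif_pos h1]
    have hle : hiF L ≤ L := hiF_le_self hL
    have hperm := cstep_batch hle r.toNat c.toNat (rep ((L, c) :: rest)) (rep rest)
      (by omega) (rep_sorted hg) (List.Perm.of_eq (rep_cons rest))
      (fun x hx => le_of_lt (rep_lt hg x hx))
    have hhead : (cstep^[r.toNat] (rep ((L, c) :: rest))).headI = L := by
      apply headI_eq_max (iterate_cstep_sorted (rep_sorted hg) _)
      · apply hperm.symm.mem_iff.mp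
        simp only [List.mem_append]
        left; left; left
        exact List.mem_replicate.mpr ⟨by omega, rfl⟩
      · intro x hx
        have hlo := loF_le_hiF L
        rcases List.mem_append.mp (hperm.mem_iff.mp hx) with h | h
        · rcases List.mem_append.mp h with h | h
          · rcases List.mem_append.mp h with h | h
            · rw [List.eq_of_mem_replicate h]
            · exact le_of_lt (rep_lt hg x h)
          · rw [List.eq_of_mem_replicate h]; omega
        · rw [List.eq_of_mem_replicate h]; omega
    rw [hhead, ansOf, ← hiF_eq_fdiv]
    rfl
  | case3 r L c rest h1 h2 =>
    intro hg _ _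
    have hc : 1 ≤ c := hg.2 (L, c) List.mem_cons_self
    omega
  | case4 r L c rest h1 h2 ih =>
    intro hg _ hhd
    have hc : 1 ≤ c := hg.2 (L, c) List.mem_cons_self
    have hL : 0 ≤ L := by simpa using hhd
    have hle : hiF L ≤ L := hiF_le_self hL
    have hfd : PySem.Int.floordiv L 2 = hiF L := (hiF_eq_fdiv L).symm
    have hfd' : PySem.Int.floordiv (L - 1) 2 = loF L := rfl
    rw [hfd, hfd'] at ih
    have hgrest : Good rest := ⟨(List.pairwise_cons.mp (by simpa using hg.1)).2,
      fun p hp => hg.2 p (List.mem_cons_of_mem _ hp)⟩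
    have hgood1 : Good (insertSeg rest (hiF L) c) := good_insertSeg rest hgrest _ c hc
    have hgood2 : Good (insertSeg (insertSeg rest (hiF L) c) (loF L) c) :=
      good_insertSeg _ hgood1 _ c hc
    have hhd2 : 0 ≤ (insertSeg (insertSeg rest (hiF L) c) (loF L) c).headI.1 := by
      have h1' := headKey_insertSeg_ge_arg rest (hiF L) c
      have h2' := headKey_insertSeg_ge_head (insertSeg rest (hiF L) c) (loF L) c
        (insertSeg_ne_nil _ _ _)
      have := hiF_nonneg hL
      omega
    have hseq : cstep^[c.toNat] (rep ((L, c) :: rest))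
        = rep (insertSeg (insertSeg rest (hiF L) c) (loF L) c) := by
      have p1 := cstep_batch hle c.toNat c.toNat (rep ((L, c) :: rest)) (rep rest)
        (le_refl _) (rep_sorted hg) (List.Perm.of_eq (rep_cons rest))
        (fun x hx => le_of_lt (rep_lt hg x hx))
      have p2 := rep_insertSeg (insertSeg rest (hiF L) c) (loF L) c hc hgood1.2
      have p3 := rep_insertSeg rest (hiF L) c hc hgrest.2
      have p4 : (rep (insertSeg (insertSeg rest (hiF L) c) (loF L) c)).Perm
          (cstep^[c.toNat] (rep ((L, c) :: rest))) := by
        refine (p2.trans ((p3.append_left _).trans ?_)).trans p1.symm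
        rw [List.perm_iff_count]
        intro y
        simp only [List.count_append, List.count_replicate]
        split_ifs <;> omega
      exact (p4.eq_of_pairwise (fun a b _ _ hab hba => le_antisymm hba hab)
        (rep_sorted hgood2) (iterate_cstep_sorted (rep_sorted hg) _)).symm
    have ihe := ih hgood2 (insertSeg_ne_nil _ _ _) hhd2
    rw [solveLoopB, dif_neg h1, dif_neg h2, hfd, hfd']
    rw [ihe, show r.toNat = (r - c).toNat + c.toNat from by omega,
      Function.iterate_add_apply, hseq]

-- ===== VERDICT (by name: the statement is the Claim_ definition above) =====
theorem solve_spec : Claim_equal_solve := by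
  intro n k _ hpre
  unfold Spec_solve
  have hsing : ([n] : List Int).Pairwise (· ≥ ·) := List.pairwise_singleton _ _
  have h1 := aLoop_perm (k - 1).toNat [-n] [n] (by simp) (by simp) hsing
  have hs := iterate_cstep_sorted hsing (k - 1).toNat
  have hne : cstep^[(k - 1).toNat] [n] ≠ [] := iterate_cstep_ne_nil (by simp) (k - 1).toNat
  have hH : (cstep^[(k - 1).toNat] [n]).headI ∈ cstep^[(k - 1).toNat] [n] := by
    obtain ⟨a, t, he⟩ := List.exists_cons_of_ne_nil hne
    rw [he]; simp
  have hmem : -(cstep^[(k - 1).toNat] [n]).headI ∈ solveLoopA [-n] (k - 1).toNat := by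
    have := h1.symm.mem_iff.mp hH
    obtain ⟨x, hx, hxe⟩ := List.mem_map.mp this
    have : x = -(cstep^[(k - 1).toNat] [n]).headI := by omega
    rwa [this] at hx
  have hmin : ∀ y ∈ solveLoopA [-n] (k - 1).toNat,
      -(cstep^[(k - 1).toNat] [n]).headI ≤ y := by
    intro y hy
    have : -y ∈ cstep^[(k - 1).toNat] [n] :=
      h1.mem_iff.mp (List.mem_map.mpr ⟨y, hy, rfl⟩)
    have := le_headI_of_sorted hs this
    omega
  have hmineq : PySem.List.min? (solveLoopA [-n] (k - 1).toNat) (fun x => x)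
      = some (-(cstep^[(k - 1).toNat] [n]).headI) := min?_eq_of_min hmem hmin
  have hA : solve n k = ansOf (cstep^[(k - 1).toNat] [n]).headI := by
    rw [solve]
    simp only [heappopA, hmineq]
    rw [ansOf, fdiv_neg_add, fdiv_neg_add' (cstep^[(k - 1).toNat] [n]).headI, neg_neg]
  have hB : solve_alt n k = ansOf (cstep^[(k - 1).toNat] [n]).headI := by
    rw [solve_alt, bLoop_eq [(n, 1)] (k - 1)
      ⟨by simp, by simp⟩ (by simp) (by simpa using hpre)]
    have : rep [(n, 1)] = [n] := by simp [rep]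
    rw [this]
  rw [hA, hB]
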